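-- pv_equiv track=rewrite | github.com/SweetTownConqueror/bgs_tests_exterminisher | v3.0/fillTest.py | extract_reference_from_textimage
-- ===== SOURCE A (Python) =====
-- def extract_reference_from_textimage(string):
--     reference = ""
--     for s in string:
--         if can_convert_to_int(s):
--             reference = reference + s
--         if s == "S":
--             break
--     return reference
--
-- def can_convert_to_int(string):
--     try:
--         int(string)
--         return True
--     except ValueError:
--         return False
-- ===== SOURCE B (Python) =====
-- def can_convert_to_int(string):
--     try:
--         int(string)
--         return True
--     except ValueError:
--         return False
--
-- def extract_reference_from_textimage(string):
--     prefix = string.partition('S')[0]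
--     return ''.join(c for c in prefix if can_convert_to_int(c))
-- ===== Notes on version B (the rewrite author's own statement) =====
-- stated objective: simpler
-- what changed: Replaces the interleaved accumulate-and-break loop by a split-then-filter decomposition: partition at the first 'S' and join the int-convertible characters of that prefix.
import Mathlib
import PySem

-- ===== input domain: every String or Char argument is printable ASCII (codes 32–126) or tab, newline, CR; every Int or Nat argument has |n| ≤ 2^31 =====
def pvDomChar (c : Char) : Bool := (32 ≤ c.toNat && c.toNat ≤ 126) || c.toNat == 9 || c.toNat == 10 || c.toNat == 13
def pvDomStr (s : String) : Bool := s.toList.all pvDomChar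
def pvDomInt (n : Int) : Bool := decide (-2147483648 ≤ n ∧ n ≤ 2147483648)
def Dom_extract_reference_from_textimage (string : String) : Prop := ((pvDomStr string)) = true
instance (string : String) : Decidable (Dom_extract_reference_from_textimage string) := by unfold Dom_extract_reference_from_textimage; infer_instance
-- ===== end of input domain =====

-- ===== PORT A =====
-- B changes A's single accumulate-and-break loop into partition-at-'S' then filter (objective: simpler).
-- can_convert_to_int: int(string) succeeds (ValueError -> false)
def can_convert_to_int (string : String) : Bool := (PySem.Int.ofStr? string).isSome

-- the for-loop with its mid-loop break, over the remaining characters and the accumulator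
def pvALoop : List Char → String → String
  | [], reference => reference
  | s :: rest, reference =>
    let reference := if can_convert_to_int (String.ofList [s]) then reference ++ String.ofList [s] else reference
    if s = 'S' then reference else pvALoop rest reference

def extract_reference_from_textimage (string : String) : String :=
  pvALoop string.toList ""

-- ===== PORT B =====
-- string.partition('S')[0]: the prefix before the first 'S' (whole string if absent) — exact for a 1-char separator
def extract_reference_from_textimage_alt (string : String) : String :=
  let pfx := String.ofList (string.toList.takeWhile (· ≠ 'S'))
  String.ofList (pfx.toList.filter (fun c => can_convert_to_int (String.ofList [c])))

-- ===== PRECONDITION & SPEC =====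
def Spec_extract_reference_from_textimage (string : String) (out : String) : Prop := out = extract_reference_from_textimage_alt string
instance (string : String) (out : String) : Decidable (Spec_extract_reference_from_textimage string out) := by unfold Spec_extract_reference_from_textimage; infer_instance

-- ===== CLAIM (what is proved, stated in full; the proofs are below) =====
def Claim_equal_extract_reference_from_textimage : Prop := ∀ (string : String), Dom_extract_reference_from_textimage string → Spec_extract_reference_from_textimage string (extract_reference_from_textimage string)

-- ===== LEMMAS AND PROOFS =====
theorem pvALoop_eq (l : List Char) (acc : String) :
    pvALoop l acc = acc ++ String.ofList ((l.takeWhile (· ≠ 'S')).filter (fun c => can_convert_to_int (String.ofList [c]))) := by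
  induction l generalizing acc with
  | nil => simp [pvALoop]
  | cons c rest ih =>
    by_cases hS : c = 'S'
    · subst hS
      have hnc : can_convert_to_int (String.ofList ['S']) = false := by decide
      simp [pvALoop, hnc]
    · simp only [pvALoop, ih, List.takeWhile_cons]
      by_cases hc : can_convert_to_int (String.ofList [c]) = true
      · simp [hS, hc, String.append_assoc, ← String.ofList_append]
      · simp [hS, hc]

-- ===== VERDICT (by name: the statement is the Claim_ definition above) =====
theorem extract_reference_from_textimage_spec : Claim_equal_extract_reference_from_textimage := by
  intro string _
  unfold Spec_extract_reference_from_textimage extract_reference_from_textimage extract_reference_from_textimage_alt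
  simp [pvALoop_eq]
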